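-- pv_equiv track=rewrite | github.com/kellyjonbrazil/jc | jc/parsers/pbPlist/StrParse.py | IndexOfNextNonSpace
-- ===== SOURCE A (Python) =====
-- def IsSpecialWhitespace(character):
--     value = ord(character)
--     result = (value >= 9 and value <= 13) # tab, newline, vt, form feed, carriage return
--     return result
--
-- def IsUnicodeSeparator(character):
--     value = ord(character)
--     result = (value == 8232 or value == 8233)
--     return result
--
-- def IsRegularWhitespace(character):
--     value = ord(character)
--     result = (value == 32 or IsUnicodeSeparator(character)) # space and Unicode line sep, para sep
--     return result
--
-- def IsNewline(character):
--     value = ord(character)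
--     result = (value == 13 or value == 10)
--     return result
--
-- def IsEndOfLine(character):
--     result = (IsNewline(character) or IsUnicodeSeparator(character))
--     return result
--
-- def IndexOfNextNonSpace(string_data, current_index): # pylint: disable=too-many-branches,too-many-statements
--     successful = False
--     found_index = current_index
--     string_length = len(string_data)
--     annotation_string = ''
--     while found_index < string_length: # pylint: disable=too-many-nested-blocks
--         current_char = string_data[found_index]
--         if IsSpecialWhitespace(current_char) is True:
--             found_index += 1
--             continue
--         if IsRegularWhitespace(current_char) is True:
--             found_index += 1
--             continue
--         if current_char == '/':
--             next_index = found_index + 1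
--             if next_index >= string_length:
--                 successful = True
--                 break
--             else:
--                 next_character = string_data[next_index]
--                 if next_character == '/': # found a line comment "//"
--                     found_index += 1
--                     next_index = found_index
--                     first_pass = True
--                     while next_index < string_length:
--                         test_char = string_data[next_index]
--                         if IsEndOfLine(test_char) is True:
--                             break
--                         else:
--                             if first_pass is False:
--                                 annotation_string += test_char
--                             else:
--                                 first_pass = False
--                         next_index += 1
--                     found_index = next_index
--                 elif next_character == '*': # found a block comment "/* ... */"
--                     found_index += 1
--                     next_index = found_index
--                     first_pass = True
--                     while next_index < string_length:
--                         test_char = string_data[next_index]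
--                         if test_char == '*' and (next_index+1 < string_length) and string_data[next_index+1] == '/':
--                             next_index += 2
--                             break
--                         else:
--                             if first_pass != True:
--                                 annotation_string += test_char
--                             else:
--                                 first_pass = False
--                         next_index += 1
--                     found_index = next_index
--                 else:
--                     successful = True
--                     break
--         else:
--             successful = True
--             break
--     result = (successful, found_index, annotation_string)
--     return result
-- ===== SOURCE B (Python) =====
-- import re
--
-- # end-of-line characters: LF, CR, and the Unicode line/paragraph separators
-- _EOL_RE = re.compile('[\n\r\u2028\u2029]')
--
-- def IndexOfNextNonSpace(string_data, current_index):
--     n = len(string_data)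
--     i = current_index
--     parts = []
--     while i < n:
--         c = string_data[i]
--         if c == ' ' or '\t' <= c <= '\r' or c == '\u2028' or c == '\u2029':
--             i += 1
--             continue
--         if c != '/':
--             return (True, i, ''.join(parts))
--         if i + 1 >= n:
--             return (True, i, ''.join(parts))
--         nxt = string_data[i + 1]
--         if nxt == '/':
--             m = _EOL_RE.search(string_data, i + 2)
--             eol = m.start() if m else n
--             parts.append(string_data[i + 2:eol])
--             i = eol
--         elif nxt == '*':
--             close = string_data.find('*/', i + 1)
--             if close == -1:
--                 parts.append(string_data[i + 2:])
--                 i = n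
--             else:
--                 parts.append(string_data[i + 2:close])
--                 i = close + 2
--         else:
--             return (True, i, ''.join(parts))
--     return (False, i, ''.join(parts))
-- ===== Notes on version B (the rewrite author's own statement) =====
-- stated objective: simpler
-- what changed: The two char-by-char inner comment loops with their first_pass flag are replaced by a regex search for the next end-of-line and str.find('*/') plus slicing, and the successful-flag/break protocol by early returns with a parts-list join; Pre_ restricts to the natural domain of non-negative parse positions, where A's negative-index wraparound scanning (and IndexError below -len) never occurs.
-- outside the precondition, e.g. on IndexOfNextNonSpace('//X', -3): A returns (False, 3, 'X//X'), B returns (False, 3, 'X')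
import Mathlib
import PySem

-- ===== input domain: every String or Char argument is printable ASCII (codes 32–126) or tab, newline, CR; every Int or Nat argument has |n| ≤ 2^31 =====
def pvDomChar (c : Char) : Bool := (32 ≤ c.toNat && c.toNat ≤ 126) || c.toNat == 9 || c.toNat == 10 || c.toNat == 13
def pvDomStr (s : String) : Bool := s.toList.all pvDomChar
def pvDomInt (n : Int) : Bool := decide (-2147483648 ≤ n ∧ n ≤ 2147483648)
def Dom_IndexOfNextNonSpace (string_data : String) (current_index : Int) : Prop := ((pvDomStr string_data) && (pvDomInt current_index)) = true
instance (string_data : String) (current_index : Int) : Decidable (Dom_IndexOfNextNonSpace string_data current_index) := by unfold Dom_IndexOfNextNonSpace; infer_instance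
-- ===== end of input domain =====

set_option maxRecDepth 8000


-- B replaces A's char-by-char inner comment loops by an end-of-line search / find("*/") plus
-- slicing, and the successful-flag/break protocol by early returns (objective: simpler).
-- Loops are ported with a fuel parameter as a totality guard (fuel = length + 1 always suffices).

-- ===== PORT A =====
def pvIsSpecialWs (c : Char) : Bool := 9 ≤ c.toNat && c.toNat ≤ 13
def pvIsUnicodeSep (c : Char) : Bool := c.toNat == 8232 || c.toNat == 8233
def pvIsRegularWs (c : Char) : Bool := c.toNat == 32 || pvIsUnicodeSep c
def pvIsNewline (c : Char) : Bool := c.toNat == 13 || c.toNat == 10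
def pvIsEOL (c : Char) : Bool := pvIsNewline c || pvIsUnicodeSep c

-- A's inner line-comment loop (next_index, first_pass, annotation accumulator)
def pvALine (cs : List Char) (fuel : Nat) (j : Nat) (firstPass : Bool) (ann : List Char) : List Char × Nat :=
  match fuel with
  | 0 => (ann, j)
  | fuel+1 =>
    if h : j < cs.length then
      let t := cs[j]
      if pvIsEOL t then (ann, j)
      else pvALine cs fuel (j+1) false (if firstPass then ann else ann ++ [t])
    else (ann, j)

-- A's inner block-comment loop
def pvABlock (cs : List Char) (fuel : Nat) (j : Nat) (firstPass : Bool) (ann : List Char) : List Char × Nat :=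
  match fuel with
  | 0 => (ann, j)
  | fuel+1 =>
    if h : j < cs.length then
      let t := cs[j]
      if t == '*' && decide (j+1 < cs.length) && (cs.getD (j+1) ' ' == '/') then (ann, j+2)
      else pvABlock cs fuel (j+1) false (if firstPass then ann else ann ++ [t])
    else (ann, j)

-- A's outer while-loop, branch for branch
def pvALoop (cs : List Char) (fuel : Nat) (i : Nat) (ann : List Char) : Bool × Nat × List Char :=
  match fuel with
  | 0 => (false, i, ann)
  | fuel+1 =>
    if h : i < cs.length then
      let c := cs[i]
      if pvIsSpecialWs c then pvALoop cs fuel (i+1) ann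
      else if pvIsRegularWs c then pvALoop cs fuel (i+1) ann
      else if c == '/' then
        if cs.length ≤ i+1 then (true, i, ann)
        else
          let nc := cs.getD (i+1) ' '
          if nc == '/' then
            let r := pvALine cs fuel (i+1) true ann
            pvALoop cs fuel r.2 r.1
          else if nc == '*' then
            let r := pvABlock cs fuel (i+1) true ann
            pvALoop cs fuel r.2 r.1
          else (true, i, ann)
      else (true, i, ann)
    else (false, i, ann)

def IndexOfNextNonSpace (string_data : String) (current_index : Int) : Bool × Int × String :=
  -- faithful on Pre_ (0 ≤ current_index); Python's negative-index wraparound lies outside Pre_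
  let cs := string_data.toList
  let r := pvALoop cs (cs.length + 1) current_index.toNat []
  (r.1, (r.2.1 : Int), String.ofList r.2.2)

-- ===== PORT B =====
def pvBIsEol (c : Char) : Bool := c.toNat == 10 || c.toNat == 13 || c.toNat == 8232 || c.toNat == 8233

-- port of _EOL_RE.search(string_data, j).start() (length when no match): first index ≥ j
-- holding a char of the class [\n\r\u2028\u2029]; exact for that regex
def pvBFindEol (cs : List Char) (j : Nat) : Nat :=
  match (cs.drop j).findIdx? pvBIsEol with
  | some k => j + k
  | none => cs.length

-- port of string_data.find('*/', j) (none for -1): first index ≥ j where '*' is followed by '/'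
def pvBFind2 (cs : List Char) (j : Nat) : Option Nat :=
  match ((cs.drop j).zip (cs.drop (j+1))).findIdx? (fun p => p.1 == '*' && p.2 == '/') with
  | some k => some (j + k)
  | none => none

-- B's while-loop: whitespace skipped on one combined test (chained char comparisons
-- ported via code points, exact), comments consumed by search + slice, early returns
def pvBLoop (cs : List Char) (fuel : Nat) (i : Nat) (parts : List Char) : Bool × Nat × List Char :=
  match fuel with
  | 0 => (false, i, parts)
  | fuel+1 =>
    if h : i < cs.length then
      let c := cs[i]
      if c.toNat == 32 || (9 ≤ c.toNat && c.toNat ≤ 13) || c.toNat == 8232 || c.toNat == 8233 then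
        pvBLoop cs fuel (i+1) parts
      else if c != '/' then (true, i, parts)
      else if cs.length ≤ i + 1 then (true, i, parts)
      else if cs.getD (i+1) ' ' == '/' then
        let eol := pvBFindEol cs (i+2)
        pvBLoop cs fuel eol (parts ++ (cs.drop (i+2)).take (eol - (i+2)))
      else if cs.getD (i+1) ' ' == '*' then
        match pvBFind2 cs (i+1) with
        | none => pvBLoop cs fuel cs.length (parts ++ cs.drop (i+2))
        | some close => pvBLoop cs fuel (close + 2) (parts ++ (cs.drop (i+2)).take (close - (i+2)))
      else (true, i, parts)
    else (false, i, parts)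

def IndexOfNextNonSpace_alt (string_data : String) (current_index : Int) : Bool × Int × String :=
  let cs := string_data.toList
  let r := pvBLoop cs (cs.length + 1) current_index.toNat []
  (r.1, (r.2.1 : Int), String.ofList r.2.2)

-- ===== PRECONDITION & SPEC =====
-- Pre_ excludes negative current_index: a parse position is naturally non-negative; there A
-- either raises IndexError (current_index < -len) or scans through Python's negative-index
-- wraparound, reading characters from the end of the string — outside the task's natural domain.
def Pre_IndexOfNextNonSpace (string_data : String) (current_index : Int) : Prop :=
  0 ≤ current_index
instance (string_data : String) (current_index : Int) : Decidable (Pre_IndexOfNextNonSpace string_data current_index) := by unfold Pre_IndexOfNextNonSpace; infer_instance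

def pvWitness_IndexOfNextNonSpace : String × Int := ("a", 0)

def Spec_IndexOfNextNonSpace (string_data : String) (current_index : Int) (out : Bool × Int × String) : Prop := out = IndexOfNextNonSpace_alt string_data current_index
instance (string_data : String) (current_index : Int) (out : Bool × Int × String) : Decidable (Spec_IndexOfNextNonSpace string_data current_index out) := by unfold Spec_IndexOfNextNonSpace; infer_instance

-- ===== CLAIM (what is proved, stated in full; the proofs are below) =====
def Claim_equal_IndexOfNextNonSpace : Prop := ∀ (string_data : String) (current_index : Int), Dom_IndexOfNextNonSpace string_data current_index → Pre_IndexOfNextNonSpace string_data current_index → Spec_IndexOfNextNonSpace string_data current_index (IndexOfNextNonSpace string_data current_index)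

-- ===== LEMMAS AND PROOFS =====

theorem pvIsEOL_eq (c : Char) : pvBIsEol c = pvIsEOL c := by
  simp only [pvBIsEol, pvIsEOL, pvIsNewline, pvIsUnicodeSep]
  rw [Bool.eq_iff_iff]
  simp only [Bool.or_eq_true, beq_iff_eq]
  omega

theorem pvWs_eq (c : Char) :
    (c.toNat == 32 || (9 ≤ c.toNat && c.toNat ≤ 13) || c.toNat == 8232 || c.toNat == 8233)
      = (pvIsSpecialWs c || pvIsRegularWs c) := by
  simp only [pvIsSpecialWs, pvIsRegularWs, pvIsUnicodeSep]
  rw [Bool.eq_iff_iff]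
  simp only [Bool.or_eq_true, Bool.and_eq_true, beq_iff_eq, decide_eq_true_eq]
  omega

-- characterisation of the EOL search
theorem pvBFindEol_beyond (cs : List Char) (j : Nat) (hj : cs.length ≤ j) :
    pvBFindEol cs j = cs.length := by
  unfold pvBFindEol
  rw [List.drop_eq_nil_of_le hj]
  rfl

theorem pvBFindEol_step (cs : List Char) (j : Nat) (h : j < cs.length) :
    pvBFindEol cs j = if pvIsEOL cs[j] then j else pvBFindEol cs (j+1) := by
  unfold pvBFindEol
  rw [List.drop_eq_getElem_cons h, List.findIdx?_cons, pvIsEOL_eq]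
  by_cases he : pvIsEOL cs[j]
  · rw [if_pos he, if_pos he]
    simp
  · rw [if_neg he, if_neg he]
    cases hm : (cs.drop (j+1)).findIdx? pvBIsEol with
    | none => simp
    | some k => simp; omega

theorem pvBFindEol_ge (cs : List Char) (j : Nat) (hj : j ≤ cs.length) :
    j ≤ pvBFindEol cs j := by
  unfold pvBFindEol
  cases hm : (cs.drop j).findIdx? pvBIsEol with
  | none => exact hj
  | some k => exact Nat.le_add_right j k

-- characterisation of find('*/')
theorem pvBFind2_beyond (cs : List Char) (j : Nat) (hj : cs.length ≤ j + 1) :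
    pvBFind2 cs j = none := by
  unfold pvBFind2
  rw [List.drop_eq_nil_of_le hj, List.zip_nil_right]
  rfl

theorem pvBFind2_step (cs : List Char) (j : Nat) (h : j + 1 < cs.length) :
    pvBFind2 cs j = if cs[j] == '*' && cs[j+1] == '/' then some j else pvBFind2 cs (j+1) := by
  unfold pvBFind2
  rw [List.drop_eq_getElem_cons (show j < cs.length by omega),
    List.drop_eq_getElem_cons h, List.zip_cons_cons, List.findIdx?_cons]
  by_cases hc : (cs[j] == '*' && cs[j+1] == '/') = true
  · rw [if_pos hc, if_pos hc]
    simp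
  · rw [if_neg hc, if_neg hc]
    rw [← List.drop_eq_getElem_cons h]
    cases hm : ((cs.drop (j+1)).zip (cs.drop (j+2))).findIdx? (fun p => p.1 == '*' && p.2 == '/') with
    | none => simp
    | some k => simp; omega

theorem pvBFind2_ge (cs : List Char) (j c : Nat) (h : pvBFind2 cs j = some c) : j ≤ c := by
  unfold pvBFind2 at h
  cases hm : ((cs.drop j).zip (cs.drop (j+1))).findIdx? (fun p => p.1 == '*' && p.2 == '/') with
  | none => rw [hm] at h; exact absurd h (by simp)
  | some k => rw [hm] at h; simp only [Option.some_inj] at h; omega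

-- A's line loop (after the first pass) appends exactly the slice up to the next EOL
theorem pvALine_spec (cs : List Char) (fuel : Nat) : ∀ (j : Nat) (ann : List Char),
    cs.length - j < fuel → j ≤ cs.length →
    pvALine cs fuel j false ann
      = (ann ++ (cs.drop j).take (pvBFindEol cs j - j), pvBFindEol cs j) := by
  induction fuel with
  | zero => intro j ann hk hj; omega
  | succ fuel ih =>
    intro j ann hk hj
    by_cases h : j < cs.length
    · rw [pvALine, dif_pos h]
      rw [pvBFindEol_step cs j h]
      by_cases he : pvIsEOL cs[j]
      · simp [he]
      · rw [if_neg he]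
        simp only [he, Bool.false_eq_true, if_false]
        rw [ih (j+1) (ann ++ [cs[j]]) (by omega) (by omega)]
        have hge : j + 1 ≤ pvBFindEol cs (j+1) := pvBFindEol_ge cs (j+1) (by omega)
        have hd : cs.drop j = cs[j] :: cs.drop (j+1) := List.drop_eq_getElem_cons h
        rw [hd]
        have harith : pvBFindEol cs (j+1) - j = (pvBFindEol cs (j+1) - (j+1)) + 1 := by omega
        rw [harith, List.take_succ_cons]
        simp
    · have hje : j = cs.length := by omega
      subst hje
      rw [pvALine, dif_neg (by omega), pvBFindEol_beyond cs cs.length le_rfl]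
      simp

-- A's line loop started with first_pass = True (on the second '/')
theorem pvALine_true (cs : List Char) (fuel : Nat) (j : Nat) (ann : List Char)
    (hk : cs.length - j < fuel) (hj : j < cs.length) (he : ¬(pvIsEOL cs[j] = true)) :
    pvALine cs fuel j true ann
      = (ann ++ (cs.drop (j+1)).take (pvBFindEol cs (j+1) - (j+1)), pvBFindEol cs (j+1)) := by
  cases fuel with
  | zero => omega
  | succ fuel =>
    rw [pvALine, dif_pos hj, if_neg he]
    simp only [if_true]
    exact pvALine_spec cs fuel (j+1) ann (by omega) (by omega)

-- A's block loop (after the first pass) appends exactly the slice up to "*/"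
theorem pvABlock_spec (cs : List Char) (fuel : Nat) : ∀ (j : Nat) (ann : List Char),
    cs.length - j < fuel → j ≤ cs.length →
    pvABlock cs fuel j false ann
      = (match pvBFind2 cs j with
         | some c => (ann ++ (cs.drop j).take (c - j), c + 2)
         | none => (ann ++ cs.drop j, cs.length)) := by
  induction fuel with
  | zero => intro j ann hk hj; omega
  | succ fuel ih =>
    intro j ann hk hj
    by_cases h : j < cs.length
    · rw [pvABlock, dif_pos h]
      by_cases h2 : j + 1 < cs.length
      · have hgd : cs.getD (j+1) ' ' = cs[j+1] := List.getD_eq_getElem cs ' ' h2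
        by_cases hc : (cs[j] == '*' && (cs[j+1] == '/')) = true
        · have hcond : (cs[j] == '*' && decide (j+1 < cs.length) && (cs.getD (j+1) ' ' == '/')) = true := by
            rw [hgd]
            simp only [Bool.and_eq_true, decide_eq_true_eq] at hc ⊢
            exact ⟨⟨hc.1, h2⟩, hc.2⟩
          rw [if_pos hcond]
          rw [pvBFind2_step cs j h2, if_pos hc]
          simp
        · have hneg : ¬((cs[j] == '*' && decide (j+1 < cs.length) && (cs.getD (j+1) ' ' == '/')) = true) := by
            rw [hgd, decide_eq_true h2, Bool.and_true]; exact hc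
          rw [if_neg hneg]
          simp only [Bool.false_eq_true, if_false]
          rw [ih (j+1) (ann ++ [cs[j]]) (by omega) (by omega)]
          rw [pvBFind2_step cs j h2, if_neg hc]
          have hd : cs.drop j = cs[j] :: cs.drop (j+1) := List.drop_eq_getElem_cons h
          cases hm : pvBFind2 cs (j+1) with
          | none =>
            rw [hd, List.append_assoc, List.singleton_append]
          | some c =>
            have hge : j + 1 ≤ c := pvBFind2_ge cs (j+1) c hm
            simp only [hd]
            have harith : c - j = (c - (j+1)) + 1 := by omega
            rw [harith, List.take_succ_cons]
            simp
      · have hcond : (cs[j] == '*' && decide (j+1 < cs.length) && (cs.getD (j+1) ' ' == '/')) = false := by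
          simp only [decide_eq_false h2, Bool.and_false, Bool.false_and]
        rw [if_neg (ne_true_of_eq_false hcond)]
        simp only [Bool.false_eq_true, if_false]
        have hstep : pvABlock cs fuel (j+1) false (ann ++ [cs[j]]) = (ann ++ [cs[j]], j+1) := by
          cases fuel with
          | zero => rw [pvABlock]
          | succ fuel => rw [pvABlock, dif_neg (by omega)]
        rw [hstep, pvBFind2_beyond cs j (by omega)]
        have hd : cs.drop j = cs[j] :: cs.drop (j+1) := List.drop_eq_getElem_cons h
        have hj1 : j + 1 = cs.length := by omega
        rw [hd, hj1, List.drop_length]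
    · have hje : j = cs.length := by omega
      subst hje
      rw [pvABlock, dif_neg (by omega), pvBFind2_beyond cs cs.length (by omega)]
      simp

-- A's block loop started with first_pass = True on the opening '*'
theorem pvABlock_true (cs : List Char) (fuel : Nat) (j : Nat) (ann : List Char)
    (hk : cs.length - j < fuel) (hj : j < cs.length) (hc : cs[j] = '*') :
    pvABlock cs fuel j true ann
      = (match pvBFind2 cs j with
         | some c => (ann ++ (cs.drop (j+1)).take (c - (j+1)), c + 2)
         | none => (ann ++ cs.drop (j+1), cs.length)) := by
  cases fuel with
  | zero => omega
  | succ fuel =>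
    rw [pvABlock, dif_pos hj]
    by_cases h2 : j + 1 < cs.length
    · have hgd : cs.getD (j+1) ' ' = cs[j+1] := List.getD_eq_getElem cs ' ' h2
      by_cases hs : (cs[j+1] == '/') = true
      · have hcond : (cs[j] == '*' && decide (j+1 < cs.length) && (cs.getD (j+1) ' ' == '/')) = true := by
          rw [hgd]
          simp only [hc, beq_self_eq_true, decide_eq_true h2, hs, Bool.and_self]
        rw [if_pos hcond]
        have hfind : pvBFind2 cs j = some j := by
          rw [pvBFind2_step cs j h2, if_pos (by simp only [hc, beq_self_eq_true, hs, Bool.and_self])]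
        rw [hfind]
        simp
      · have hs' : (cs[j+1] == '/') = false := Bool.eq_false_iff.mpr hs
        have hcond : (cs[j] == '*' && decide (j+1 < cs.length) && (cs.getD (j+1) ' ' == '/')) = false := by
          rw [hgd]
          simp only [hs', Bool.and_false]
        rw [if_neg (ne_true_of_eq_false hcond)]
        simp only [if_true]
        have hfind : pvBFind2 cs j = pvBFind2 cs (j+1) := by
          rw [pvBFind2_step cs j h2, if_neg (ne_true_of_eq_false (by simp only [hs', Bool.and_false]))]
        rw [hfind]
        simpa using pvABlock_spec cs fuel (j+1) ann (by omega) (by omega)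
    · have hcond : (cs[j] == '*' && decide (j+1 < cs.length) && (cs.getD (j+1) ' ' == '/')) = false := by
        simp only [decide_eq_false h2, Bool.and_false, Bool.false_and]
      rw [if_neg (ne_true_of_eq_false hcond)]
      simp only [if_true]
      have hstep : pvABlock cs fuel (j+1) false ann = (ann, j+1) := by
        cases fuel with
        | zero => rw [pvABlock]
        | succ fuel => rw [pvABlock, dif_neg (by omega)]
      rw [hstep, pvBFind2_beyond cs j (by omega)]
      have hj1 : j + 1 = cs.length := by omega
      rw [hj1, List.drop_length]
      simp

theorem pvAB_fuel (fuel : Nat) : ∀ (cs : List Char) (i : Nat) (parts : List Char),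
    cs.length - i < fuel → pvALoop cs fuel i parts = pvBLoop cs fuel i parts := by
  induction fuel with
  | zero => intro cs i parts hk; omega
  | succ fuel ih =>
    intro cs i parts hk
    by_cases h : i < cs.length
    · rw [pvALoop, pvBLoop, dif_pos h, dif_pos h]
      by_cases hws : (cs[i].toNat == 32 || (9 ≤ cs[i].toNat && cs[i].toNat ≤ 13) || cs[i].toNat == 8232 || cs[i].toNat == 8233) = true
      · rw [if_pos hws]
        rw [pvWs_eq] at hws
        by_cases hsp : pvIsSpecialWs cs[i] = true
        · rw [if_pos hsp]; exact ih cs (i+1) parts (by omega)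
        · have hrg : pvIsRegularWs cs[i] = true := by
            rcases Bool.or_eq_true_iff.mp hws with h' | h'
            · exact absurd h' hsp
            · exact h'
          rw [if_neg hsp, if_pos hrg]
          exact ih cs (i+1) parts (by omega)
      · have hwsf : (cs[i].toNat == 32 || (9 ≤ cs[i].toNat && cs[i].toNat ≤ 13) || cs[i].toNat == 8232 || cs[i].toNat == 8233) = false :=
          Bool.eq_false_iff.mpr hws
        rw [if_neg hws]
        rw [pvWs_eq] at hwsf
        have hsp : ¬(pvIsSpecialWs cs[i] = true) :=
          ne_true_of_eq_false (Bool.or_eq_false_iff.mp hwsf).1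
        have hrg : ¬(pvIsRegularWs cs[i] = true) :=
          ne_true_of_eq_false (Bool.or_eq_false_iff.mp hwsf).2
        rw [if_neg hsp, if_neg hrg]
        by_cases hslash : (cs[i] == '/') = true
        · rw [if_pos hslash]
          have hne : ¬((cs[i] != '/') = true) := by
            simp only [bne, hslash, Bool.not_true]; exact ne_true_of_eq_false rfl
          rw [if_neg hne]
          by_cases hlen : cs.length ≤ i + 1
          · rw [if_pos hlen, if_pos hlen]
          · rw [if_neg hlen, if_neg hlen]
            have h2 : i + 1 < cs.length := by omega
            have hgd : cs.getD (i+1) ' ' = cs[i+1] := List.getD_eq_getElem cs ' ' h2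
            by_cases hn1 : (cs.getD (i+1) ' ' == '/') = true
            · rw [if_pos hn1, if_pos hn1]
              -- line comment: A's inner loop versus find-EOL + slice
              have hc1 : cs[i+1] = '/' := by rw [hgd] at hn1; exact beq_iff_eq.mp hn1
              have heol : ¬(pvIsEOL cs[i+1] = true) := by rw [hc1]; decide
              rw [pvALine_true cs fuel (i+1) parts (by omega) h2 heol]
              have hge : i + 2 ≤ pvBFindEol cs (i+2) := pvBFindEol_ge cs (i+2) (by omega)
              exact ih cs (pvBFindEol cs (i+2)) _ (by omega)
            · rw [if_neg hn1, if_neg hn1]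
              by_cases hn2 : (cs.getD (i+1) ' ' == '*') = true
              · rw [if_pos hn2, if_pos hn2]
                have hc1 : cs[i+1] = '*' := by rw [hgd] at hn2; exact beq_iff_eq.mp hn2
                rw [pvABlock_true cs fuel (i+1) parts (by omega) h2 hc1]
                cases hm : pvBFind2 cs (i+1) with
                | none =>
                  exact ih cs cs.length _ (by omega)
                | some close =>
                  have hge : i + 1 ≤ close := pvBFind2_ge cs (i+1) close hm
                  exact ih cs (close + 2) _ (by omega)
              · rw [if_neg hn2, if_neg hn2]
        · have hne : (cs[i] != '/') = true := by
            have hbf : (cs[i] == '/') = false := Bool.eq_false_iff.mpr hslash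
            simp only [bne, hbf, Bool.not_false]
          rw [if_neg hslash, if_pos hne]
    · rw [pvALoop, pvBLoop, dif_neg h, dif_neg h]

-- ===== VERDICT (by name: the statement is the Claim_ definition above) =====
theorem IndexOfNextNonSpace_spec : Claim_equal_IndexOfNextNonSpace := by
  intro s i _ _
  unfold Spec_IndexOfNextNonSpace
  simp only [IndexOfNextNonSpace, IndexOfNextNonSpace_alt]
  rw [pvAB_fuel (s.toList.length + 1) s.toList i.toNat [] (by omega)]
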